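-- pv_equiv track=rewrite | github.com/tbrown91/wilson_deMaio | bacterial_weighted/recomb_ancestry.py | split_ancestry
-- ===== SOURCE A (Python) =====
-- def split_ancestry(child_ancestry,recomb_start,recomb_end,genome_length):
--     #Take the ancestral material from the chosen child and split the material
--     #based on the recombination interval
--     parent1_ancestry = []
--     parent2_ancestry = []
--
--     if recomb_start <= recomb_end:
--         #Recombination interval does not wrap round the end of the genome
--
--         for i in range(len(child_ancestry)):
--
--             if (recomb_start <= child_ancestry[i][1]) and (recomb_end >= child_ancestry[i][0]):
--                 #Recombination interval contains some material from the current interval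
--
--                 if (recomb_start <= child_ancestry[i][0]) and (recomb_end >= child_ancestry[i][1]):
--                     #Recombination interval contains the entire interval
--                     parent2_ancestry.append([child_ancestry[i][0],child_ancestry[i][1]])
--
--                 elif (recomb_start <= child_ancestry[i][0]) and (recomb_end < child_ancestry[i][1]):
--                     #Recombination interval takes the start of an ancestral interval - give to parent 2
--                     parent2_ancestry.append([child_ancestry[i][0],recomb_end])
--                     parent1_ancestry.append([recomb_end+1,child_ancestry[i][1]])
--
--                 elif (recomb_start > child_ancestry[i][0]) and (recomb_end >= child_ancestry[i][1]):
--                     #Recombination interval takes the end of an ancestral interval - give to parent 2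
--                     parent2_ancestry.append([recomb_start,child_ancestry[i][1]])
--                     parent1_ancestry.append([child_ancestry[i][0],recomb_start-1])
--
--                 else:
--                     #Recombination interval takes a central section of the interval
--                     parent2_ancestry.append([recomb_start,recomb_end])
--                     parent1_ancestry.append([child_ancestry[i][0],recomb_start-1])
--                     parent1_ancestry.append([recomb_end+1,child_ancestry[i][1]])
--
--             else:
--                 #Recombination interval does not affect current ancestral interval
--                 parent1_ancestry.append([child_ancestry[i][0],child_ancestry[i][1]])
--
--     else:
--         #Recombination interval wraps around the end of the genome
--
--         if (child_ancestry[0][0] == 0) and (child_ancestry[0][1] == genome_length - 1):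
--             #Ancestral material is entire genome
--             parent1_ancestry.append([recomb_end+1,recomb_start-1])
--             parent2_ancestry.append([0,recomb_end])
--             parent2_ancestry.append([recomb_start,genome_length-1])
--
--         else:
--             for i in range(len(child_ancestry)):
--
--                 if recomb_start <= child_ancestry[i][1]:
--                     #Recombination interval includes ancestral interval
--
--                     if recomb_start <= child_ancestry[i][0]:
--                         #Recombination interval includes entire ancestral interval
--                         parent2_ancestry.append([child_ancestry[i][0],child_ancestry[i][1]])
--
--                     else:
--                         #Recombination interval splits ancestral interval
--                         parent2_ancestry.append([recomb_start,child_ancestry[i][1]])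
--                         parent1_ancestry.append([child_ancestry[i][0],recomb_start-1])
--
--                 elif recomb_end >= child_ancestry[i][0]:
--                     #Recombination interval includes ancestral interval
--
--                     if recomb_end >= child_ancestry[i][1]:
--                         #Recombination interval includes entire ancestral interval
--                         parent2_ancestry.append([child_ancestry[i][0],child_ancestry[i][1]])
--
--                     else:
--                         #Recombination interval splits ancestral interval
--                         parent2_ancestry.append([child_ancestry[i][0],recomb_end])
--                         parent1_ancestry.append([recomb_end+1,child_ancestry[i][1]])
--
--                 else:
--                     #Recombination interval does not affect current ancestral interval
--                     parent1_ancestry.append([child_ancestry[i][0],child_ancestry[i][1]])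
--
--
--     return [parent1_ancestry,parent2_ancestry]
-- ===== SOURCE B (Python) =====
-- def _pieces(a, b, cuts):
--     # split [a, b] at every cut c with a < c <= b (cuts given ascending)
--     out = []
--     lo = a
--     for c in cuts:
--         if a < c <= b:
--             out.append([lo, c - 1])
--             lo = c
--     out.append([lo, b])
--     return out
--
--
-- def _route_wrap(a, b, rs, re):
--     # wrap-around routing: rs-side has priority, then re-side, else untouched
--     if rs <= b:
--         ps = _pieces(a, b, [rs])
--         return ([p for p in ps if p[0] < rs], [p for p in ps if p[0] >= rs])
--     if re >= a:
--         ps = _pieces(a, b, [re + 1])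
--         return ([p for p in ps if p[0] > re], [p for p in ps if p[0] <= re])
--     return ([[a, b]], [])
--
--
-- def split_ancestry(child_ancestry, recomb_start, recomb_end, genome_length):
--     rs, re = recomb_start, recomb_end
--     if rs <= re:
--         # split every interval at the region boundaries, then classify pieces
--         pieced = [_pieces(iv[0], iv[1], [rs, re + 1]) for iv in child_ancestry]
--         p2 = [p for ps in pieced for p in ps if rs <= p[1] and p[0] <= re]
--         p1 = [p for ps in pieced for p in ps if not (rs <= p[1] and p[0] <= re)]
--         return [p1, p2]
--     first = child_ancestry[0]
--     if first[0] == 0 and first[1] == genome_length - 1: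
--         return [[[re + 1, rs - 1]], [[0, re], [rs, genome_length - 1]]]
--     routed = [_route_wrap(iv[0], iv[1], rs, re) for iv in child_ancestry]
--     return [[p for r in routed for p in r[0]], [p for r in routed for p in r[1]]]
-- ===== Notes on version B (the rewrite author's own statement) =====
-- stated objective: alternative
-- what changed: A's single mutating loop with a four-way (resp. nested) case enumeration is replaced by a split-then-classify algorithm: a generic helper cuts each interval at the region boundaries into pieces, pure per-interval routing classifies each piece, and the two parents are assembled by staged comprehensions over the routed pieces; the entire-genome wrap shortcut is kept.
import Mathlib
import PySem

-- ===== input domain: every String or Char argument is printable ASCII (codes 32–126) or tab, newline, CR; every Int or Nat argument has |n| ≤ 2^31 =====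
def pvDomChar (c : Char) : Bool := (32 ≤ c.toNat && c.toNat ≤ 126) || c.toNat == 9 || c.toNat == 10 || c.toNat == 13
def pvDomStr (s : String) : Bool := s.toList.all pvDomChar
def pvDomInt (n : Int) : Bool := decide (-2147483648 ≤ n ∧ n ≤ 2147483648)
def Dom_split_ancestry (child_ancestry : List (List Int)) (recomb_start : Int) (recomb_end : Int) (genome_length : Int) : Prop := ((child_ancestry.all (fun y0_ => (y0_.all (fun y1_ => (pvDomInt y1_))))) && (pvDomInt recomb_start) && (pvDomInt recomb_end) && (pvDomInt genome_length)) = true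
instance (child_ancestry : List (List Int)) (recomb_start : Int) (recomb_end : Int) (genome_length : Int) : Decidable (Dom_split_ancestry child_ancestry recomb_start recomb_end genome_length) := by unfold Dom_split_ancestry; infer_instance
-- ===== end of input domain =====

-- B replaces A's mutating two-accumulator loop with four-way case enumeration by a
-- split-then-classify algorithm (cut each interval at the region boundaries, classify
-- the pieces, assemble by staged passes); same O(n) cost, alternative decomposition.

-- iv[k] for 0 ≤ k < iv.length (Pre_ guarantees that range, so the getD default is never used)
def pvIdx (iv : List Int) (k : Int) : Int := (PySem.List.pyGet? iv k).getD 0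

-- ===== PORT A =====
-- body of A's non-wrap loop, state = (parent1, parent2)
def aStep (rs re : Int) (st : List (List Int) × List (List Int)) (iv : List Int) : List (List Int) × List (List Int) :=
  let a := pvIdx iv 0
  let b := pvIdx iv 1
  if rs ≤ b ∧ re ≥ a then
    if rs ≤ a ∧ re ≥ b then (st.1, st.2 ++ [[a, b]])
    else if rs ≤ a ∧ re < b then (st.1 ++ [[re + 1, b]], st.2 ++ [[a, re]])
    else if rs > a ∧ re ≥ b then (st.1 ++ [[a, rs - 1]], st.2 ++ [[rs, b]])
    else (st.1 ++ [[a, rs - 1], [re + 1, b]], st.2 ++ [[rs, re]])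
  else (st.1 ++ [[a, b]], st.2)

-- body of A's wrap-around loop
def aWrapStep (rs re : Int) (st : List (List Int) × List (List Int)) (iv : List Int) : List (List Int) × List (List Int) :=
  let a := pvIdx iv 0
  let b := pvIdx iv 1
  if rs ≤ b then
    if rs ≤ a then (st.1, st.2 ++ [[a, b]])
    else (st.1 ++ [[a, rs - 1]], st.2 ++ [[rs, b]])
  else if re ≥ a then
    if re ≥ b then (st.1, st.2 ++ [[a, b]])
    else (st.1 ++ [[re + 1, b]], st.2 ++ [[a, re]])
  else (st.1 ++ [[a, b]], st.2)

def split_ancestry (child_ancestry : List (List Int)) (recomb_start : Int) (recomb_end : Int) (genome_length : Int) : List (List (List Int)) :=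
  if recomb_start ≤ recomb_end then
    let st := child_ancestry.foldl (aStep recomb_start recomb_end) ([], [])
    [st.1, st.2]
  else
    let h := child_ancestry.headD []
    if pvIdx h 0 = 0 ∧ pvIdx h 1 = genome_length - 1 then
      [[[recomb_end + 1, recomb_start - 1]], [[0, recomb_end], [recomb_start, genome_length - 1]]]
    else
      let st := child_ancestry.foldl (aWrapStep recomb_start recomb_end) ([], [])
      [st.1, st.2]

-- ===== PORT B =====
-- _pieces: split [a,b] at every cut c with a < c ≤ b (cuts ascending)
def piecesB (a b : Int) (cuts : List Int) : List (List Int) :=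
  let st := cuts.foldl
    (fun (st : List (List Int) × Int) c =>
      if a < c ∧ c ≤ b then (st.1 ++ [[st.2, c - 1]], c) else st) ([], a)
  st.1 ++ [[st.2, b]]

-- _route_wrap: rs-side has priority, then re-side, else untouched
def routeWrapB (a b rs re : Int) : List (List Int) × List (List Int) :=
  if rs ≤ b then
    let ps := piecesB a b [rs]
    (ps.filter (fun p => decide (pvIdx p 0 < rs)), ps.filter (fun p => decide (rs ≤ pvIdx p 0)))
  else if re ≥ a then
    let ps := piecesB a b [re + 1]
    (ps.filter (fun p => decide (re < pvIdx p 0)), ps.filter (fun p => decide (pvIdx p 0 ≤ re)))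
  else ([[a, b]], [])

def split_ancestry_alt (child_ancestry : List (List Int)) (recomb_start : Int) (recomb_end : Int) (genome_length : Int) : List (List (List Int)) :=
  let rs := recomb_start
  let re := recomb_end
  if rs ≤ re then
    let pieced := child_ancestry.map (fun iv => piecesB (pvIdx iv 0) (pvIdx iv 1) [rs, re + 1])
    let p2 := pieced.flatMap (fun ps => ps.filter (fun p => decide (rs ≤ pvIdx p 1 ∧ pvIdx p 0 ≤ re)))
    let p1 := pieced.flatMap (fun ps => ps.filter (fun p => decide (¬ (rs ≤ pvIdx p 1 ∧ pvIdx p 0 ≤ re))))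
    [p1, p2]
  else
    let first := child_ancestry.headD []
    if pvIdx first 0 = 0 ∧ pvIdx first 1 = genome_length - 1 then
      [[[re + 1, rs - 1]], [[0, re], [rs, genome_length - 1]]]
    else
      let routed := child_ancestry.map (fun iv => routeWrapB (pvIdx iv 0) (pvIdx iv 1) rs re)
      [routed.flatMap (fun r => r.1), routed.flatMap (fun r => r.2)]

-- ===== PRECONDITION & SPEC =====
-- Pre_ excludes exactly the inputs where Python A raises IndexError: an interval with fewer
-- than two entries that the loop actually reads, or an empty child_ancestry in the wrap branch.
def Pre_split_ancestry (child_ancestry : List (List Int)) (recomb_start : Int) (recomb_end : Int) (genome_length : Int) : Prop :=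
  if recomb_start ≤ recomb_end then
    ∀ iv ∈ child_ancestry, 2 ≤ iv.length
  else
    child_ancestry ≠ [] ∧ 2 ≤ (child_ancestry.headD []).length ∧
      (((child_ancestry.headD []).getD 0 0 = 0 ∧ (child_ancestry.headD []).getD 1 0 = genome_length - 1) ∨
        ∀ iv ∈ child_ancestry, 2 ≤ iv.length)
instance (child_ancestry : List (List Int)) (recomb_start : Int) (recomb_end : Int) (genome_length : Int) : Decidable (Pre_split_ancestry child_ancestry recomb_start recomb_end genome_length) := by unfold Pre_split_ancestry; infer_instance

def pvWitness_split_ancestry : List (List Int) × Int × Int × Int := ([[0, 4], [6, 9]], 2, 7, 10)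

def Spec_split_ancestry (child_ancestry : List (List Int)) (recomb_start : Int) (recomb_end : Int) (genome_length : Int) (out : List (List (List Int))) : Prop := out = split_ancestry_alt child_ancestry recomb_start recomb_end genome_length
instance (child_ancestry : List (List Int)) (recomb_start : Int) (recomb_end : Int) (genome_length : Int) (out : List (List (List Int))) : Decidable (Spec_split_ancestry child_ancestry recomb_start recomb_end genome_length out) := by unfold Spec_split_ancestry; infer_instance

-- ===== CLAIM (what is proved, stated in full; the proofs are below) =====
def Claim_equal_split_ancestry : Prop := ∀ (child_ancestry : List (List Int)) (recomb_start : Int) (recomb_end : Int) (genome_length : Int), Dom_split_ancestry child_ancestry recomb_start recomb_end genome_length → Pre_split_ancestry child_ancestry recomb_start recomb_end genome_length → Spec_split_ancestry child_ancestry recomb_start recomb_end genome_length (split_ancestry child_ancestry recomb_start recomb_end genome_length)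

-- ===== LEMMAS AND PROOFS =====

theorem pvIdx_two_zero (x y : Int) : pvIdx [x, y] 0 = x := rfl
theorem pvIdx_two_one (x y : Int) : pvIdx [x, y] 1 = y := rfl

-- per-interval contributions of A's non-wrap step, over plain endpoints
def gA1 (rs re a b : Int) : List (List Int) :=
  if rs ≤ b ∧ re ≥ a then
    if rs ≤ a ∧ re ≥ b then []
    else if rs ≤ a ∧ re < b then [[re + 1, b]]
    else if rs > a ∧ re ≥ b then [[a, rs - 1]]
    else [[a, rs - 1], [re + 1, b]]
  else [[a, b]]

def gA2 (rs re a b : Int) : List (List Int) :=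
  if rs ≤ b ∧ re ≥ a then
    if rs ≤ a ∧ re ≥ b then [[a, b]]
    else if rs ≤ a ∧ re < b then [[a, re]]
    else if rs > a ∧ re ≥ b then [[rs, b]]
    else [[rs, re]]
  else []

-- per-interval contributions of A's wrap step
def gW1 (rs re a b : Int) : List (List Int) :=
  if rs ≤ b then (if rs ≤ a then [] else [[a, rs - 1]])
  else if re ≥ a then (if re ≥ b then [] else [[re + 1, b]])
  else [[a, b]]

def gW2 (rs re a b : Int) : List (List Int) :=
  if rs ≤ b then (if rs ≤ a then [[a, b]] else [[rs, b]])
  else if re ≥ a then (if re ≥ b then [[a, b]] else [[a, re]])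
  else []

theorem aStep_decomp (rs re : Int) (st : List (List Int) × List (List Int)) (iv : List Int) :
    aStep rs re st iv = (st.1 ++ gA1 rs re (pvIdx iv 0) (pvIdx iv 1), st.2 ++ gA2 rs re (pvIdx iv 0) (pvIdx iv 1)) := by
  unfold aStep gA1 gA2
  dsimp only
  split_ifs <;> simp

theorem aWrapStep_decomp (rs re : Int) (st : List (List Int) × List (List Int)) (iv : List Int) :
    aWrapStep rs re st iv = (st.1 ++ gW1 rs re (pvIdx iv 0) (pvIdx iv 1), st.2 ++ gW2 rs re (pvIdx iv 0) (pvIdx iv 1)) := by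
  unfold aWrapStep gW1 gW2
  dsimp only
  split_ifs <;> simp

theorem foldl_step_decomp {α : Type} (f g : α → List (List Int))
    (step : List (List Int) × List (List Int) → α → List (List Int) × List (List Int))
    (hstep : ∀ st iv, step st iv = (st.1 ++ f iv, st.2 ++ g iv))
    (l : List α) (st : List (List Int) × List (List Int)) :
    l.foldl step st = (st.1 ++ l.flatMap f, st.2 ++ l.flatMap g) := by
  induction l generalizing st with
  | nil => simp
  | cons x xs ih => simp [List.foldl_cons, hstep, ih, List.flatMap_cons]

theorem flatMap_congr_mem {α β : Type} (l : List α) (f g : α → List β)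
    (h : ∀ x ∈ l, f x = g x) : l.flatMap f = l.flatMap g := by
  induction l with
  | nil => rfl
  | cons x xs ih =>
    simp only [List.flatMap_cons, h x (List.mem_cons_self), ih (fun y hy => h y (List.mem_cons_of_mem _ hy))]

-- B's per-piece results coincide with A's per-interval contributions
theorem pieces_filter2 (rs re a b : Int) (h : rs ≤ re) :
    (piecesB a b [rs, re + 1]).filter
      (fun p => decide (rs ≤ pvIdx p 1 ∧ pvIdx p 0 ≤ re)) = gA2 rs re a b := by
  unfold piecesB gA2
  simp only [List.foldl_cons, List.foldl_nil]
  split_ifs <;>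
    simp only [List.nil_append, List.append_assoc, List.cons_append, List.filter_append, List.filter_cons,
      List.filter_nil, pvIdx_two_zero, pvIdx_two_one, decide_eq_true_eq] <;>
    split_ifs <;> (try simp only [List.cons.injEq, List.nil_eq, and_true, true_and, and_self]) <;> (first | trivial | omega)

theorem pieces_filter1 (rs re a b : Int) (h : rs ≤ re) :
    (piecesB a b [rs, re + 1]).filter
      (fun p => decide (¬ (rs ≤ pvIdx p 1 ∧ pvIdx p 0 ≤ re))) = gA1 rs re a b := by
  unfold piecesB gA1
  simp only [List.foldl_cons, List.foldl_nil]
  split_ifs <;>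
    simp only [List.nil_append, List.append_assoc, List.cons_append, List.filter_append, List.filter_cons,
      List.filter_nil, pvIdx_two_zero, pvIdx_two_one, decide_eq_true_eq] <;>
    split_ifs <;> (try simp only [List.cons.injEq, List.nil_eq, and_true, true_and, and_self]) <;> (first | trivial | omega)

theorem routeWrap_fst (rs re a b : Int) (h : re < rs) :
    (routeWrapB a b rs re).1 = gW1 rs re a b := by
  unfold routeWrapB piecesB gW1
  simp only [List.foldl_cons, List.foldl_nil]
  split_ifs <;>
    simp only [List.nil_append, List.append_assoc, List.cons_append, List.filter_append, List.filter_cons,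
      List.filter_nil, pvIdx_two_zero, pvIdx_two_one, decide_eq_true_eq] <;>
    split_ifs <;> (try simp only [List.cons.injEq, List.nil_eq, and_true, true_and, and_self]) <;> (first | trivial | omega)

theorem routeWrap_snd (rs re a b : Int) (h : re < rs) :
    (routeWrapB a b rs re).2 = gW2 rs re a b := by
  unfold routeWrapB piecesB gW2
  simp only [List.foldl_cons, List.foldl_nil]
  split_ifs <;>
    simp only [List.nil_append, List.append_assoc, List.cons_append, List.filter_append, List.filter_cons,
      List.filter_nil, pvIdx_two_zero, pvIdx_two_one, decide_eq_true_eq] <;>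
    split_ifs <;> (try simp only [List.cons.injEq, List.nil_eq, and_true, true_and, and_self]) <;> (first | trivial | omega)

-- ===== VERDICT (by name: the statement is the Claim_ definition above) =====
theorem split_ancestry_spec : Claim_equal_split_ancestry := by
  intro ca rs re gl _ _
  unfold Spec_split_ancestry split_ancestry split_ancestry_alt
  by_cases h : rs ≤ re
  · simp only [h, if_pos]
    rw [foldl_step_decomp (fun iv => gA1 rs re (pvIdx iv 0) (pvIdx iv 1))
        (fun iv => gA2 rs re (pvIdx iv 0) (pvIdx iv 1)) _ (aStep_decomp rs re) ca ([], [])]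
    simp only [List.nil_append, List.flatMap_map]
    congr 1
    · exact (flatMap_congr_mem ca _ _ (fun iv _ => pieces_filter1 rs re (pvIdx iv 0) (pvIdx iv 1) h)).symm
    congr 1
    exact (flatMap_congr_mem ca _ _ (fun iv _ => pieces_filter2 rs re (pvIdx iv 0) (pvIdx iv 1) h)).symm
  · have hre : re < rs := lt_of_not_ge h
    simp only [h, if_false]
    by_cases hg : pvIdx (ca.headD []) 0 = 0 ∧ pvIdx (ca.headD []) 1 = gl - 1
    · simp only [List.headD] at hg ⊢
      rw [if_pos hg, if_pos hg]
    · simp only [List.headD] at hg ⊢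
      rw [if_neg hg, if_neg hg]
      rw [foldl_step_decomp (fun iv => gW1 rs re (pvIdx iv 0) (pvIdx iv 1))
          (fun iv => gW2 rs re (pvIdx iv 0) (pvIdx iv 1)) _ (aWrapStep_decomp rs re) ca ([], [])]
      simp only [List.nil_append, List.flatMap_map]
      congr 1
      · exact (flatMap_congr_mem ca _ _ (fun iv _ => routeWrap_fst rs re (pvIdx iv 0) (pvIdx iv 1) hre)).symm
      congr 1
      exact (flatMap_congr_mem ca _ _ (fun iv _ => routeWrap_snd rs re (pvIdx iv 0) (pvIdx iv 1) hre)).symm
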